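-- pv_equiv track=rewrite | github.com/CAPP-SRC/hierarchical-brep-graphs | src/mesh_operations.py | sort_edges_to_facets
-- ===== SOURCE A (Python) =====
-- from collections import defaultdict
--
-- def sort_edges_to_facets(edge_dict, edges_to_facets_dict):
--     new_edge_to_facets = {}
--
--     edge_groups = defaultdict(list)
--     for key, val in sorted(edge_dict.items()):
--         edge_groups[val].append(key)
--
--     for group in edge_groups.values():
--         new_edge_to_facets[group[0]] = [edges_to_facets_dict[group[0]]]
--
--         for i in range(1, len(group)):
--             new_edge_to_facets[group[0]].append(edges_to_facets_dict[group[i]])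
--
--     return new_edge_to_facets
-- ===== SOURCE B (Python) =====
-- def sort_edges_to_facets(edge_dict, edges_to_facets_dict):
--     # single streaming pass over the sorted items; no intermediate group lists
--     result = {}
--     rep = {}  # value -> first (smallest) key seen with that value
--     for key, val in sorted(edge_dict.items()):
--         if val not in rep:
--             rep[val] = key
--             result[key] = []
--         result[rep[val]].append(edges_to_facets_dict[key])
--     return result
-- ===== Notes on version B (the rewrite author's own statement) =====
-- stated objective: simpler
-- what changed: replaces A's two-phase group-then-rebuild (a defaultdict of per-value key lists followed by an indexed inner loop over each group) with a single streaming pass over the sorted items that keeps a value->first-key map and appends each facet directly to its group's entry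
import Mathlib
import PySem

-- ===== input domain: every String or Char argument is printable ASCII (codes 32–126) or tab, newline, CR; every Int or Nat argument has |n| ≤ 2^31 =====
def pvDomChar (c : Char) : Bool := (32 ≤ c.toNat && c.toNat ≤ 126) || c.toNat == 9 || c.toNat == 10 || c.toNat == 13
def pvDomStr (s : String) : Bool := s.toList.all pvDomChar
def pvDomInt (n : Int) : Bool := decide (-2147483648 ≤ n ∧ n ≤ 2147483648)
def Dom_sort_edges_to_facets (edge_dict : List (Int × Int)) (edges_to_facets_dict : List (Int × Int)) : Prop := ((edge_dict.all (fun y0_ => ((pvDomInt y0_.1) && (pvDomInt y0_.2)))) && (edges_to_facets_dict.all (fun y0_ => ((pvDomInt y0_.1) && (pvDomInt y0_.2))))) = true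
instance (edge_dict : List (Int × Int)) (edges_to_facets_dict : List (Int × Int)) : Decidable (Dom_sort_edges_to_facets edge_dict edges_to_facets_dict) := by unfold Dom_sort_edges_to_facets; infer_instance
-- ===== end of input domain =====

-- B replaces A's two-phase group-then-rebuild (defaultdict of per-value key lists, then an
-- indexed inner loop per group) with one streaming pass over the sorted items (objective: simpler).

-- ===== PORT A =====
-- Python's edges_to_facets_dict[k] raises KeyError on a missing key; Pre_ guarantees the key is
-- present, so the total 'getD … 0' lookup is exact on every admitted input.
def sort_edges_to_facets (edge_dict : List (Int × Int)) (edges_to_facets_dict : List (Int × Int)) : List (Int × List Int) :=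
  let etf : PySem.Dict Int Int := PySem.Dict.ofList edges_to_facets_dict
  let edge_groups : PySem.Dict Int (List Int) :=
    (PySem.List.sorted2 edge_dict (fun kv => kv.1) (fun kv => kv.2)).foldl
      (fun d kv => d.modify kv.2 [] (fun g => g ++ [kv.1])) PySem.Dict.empty
  let new_edge_to_facets : PySem.Dict Int (List Int) :=
    edge_groups.values.foldl
      (fun nd group =>
        match group with
        | [] => nd
        | g0 :: rest =>
          rest.foldl (fun nd k => nd.modify g0 [] (fun l => l ++ [etf.getD k 0]))
            (nd.insert g0 [etf.getD g0 0]))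
      PySem.Dict.empty
  new_edge_to_facets.items

-- ===== PORT B =====
def sort_edges_to_facets_alt (edge_dict : List (Int × Int)) (edges_to_facets_dict : List (Int × Int)) : List (Int × List Int) :=
  let etf : PySem.Dict Int Int := PySem.Dict.ofList edges_to_facets_dict
  let st :=
    (PySem.List.sorted2 edge_dict (fun kv => kv.1) (fun kv => kv.2)).foldl
      (fun (st : PySem.Dict Int (List Int) × PySem.Dict Int Int) kv =>
        let res := if st.2.contains kv.2 then (st.1, st.2)
                   else (st.1.insert kv.1 [], st.2.insert kv.2 kv.1)
        (res.1.modify (res.2.getD kv.2 0) [] (fun l => l ++ [etf.getD kv.1 0]), res.2))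
      ((PySem.Dict.empty : PySem.Dict Int (List Int)), (PySem.Dict.empty : PySem.Dict Int Int))
  st.1.items

-- ===== PRECONDITION & SPEC =====
-- Pre_ excludes (a) inputs where some key of edge_dict is missing from edges_to_facets_dict, on
-- which A raises KeyError, and (b) association lists with duplicate keys, which do not represent
-- a Python dict (both arguments are dicts in A).
def Pre_sort_edges_to_facets (edge_dict : List (Int × Int)) (edges_to_facets_dict : List (Int × Int)) : Prop :=
  (edge_dict.map Prod.fst).Nodup ∧ (edges_to_facets_dict.map Prod.fst).Nodup ∧
  ∀ p ∈ edge_dict, p.1 ∈ edges_to_facets_dict.map Prod.fst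
instance (edge_dict : List (Int × Int)) (edges_to_facets_dict : List (Int × Int)) : Decidable (Pre_sort_edges_to_facets edge_dict edges_to_facets_dict) := by unfold Pre_sort_edges_to_facets; infer_instance

def pvWitness_sort_edges_to_facets : (List (Int × Int)) × (List (Int × Int)) :=
  ([(3, 1), (1, 1), (2, 2)], [(1, 10), (2, 20), (3, 30)])

def Spec_sort_edges_to_facets (edge_dict : List (Int × Int)) (edges_to_facets_dict : List (Int × Int)) (out : List (Int × List Int)) : Prop := out = sort_edges_to_facets_alt edge_dict edges_to_facets_dict
instance (edge_dict : List (Int × Int)) (edges_to_facets_dict : List (Int × Int)) (out : List (Int × List Int)) : Decidable (Spec_sort_edges_to_facets edge_dict edges_to_facets_dict out) := by unfold Spec_sort_edges_to_facets; infer_instance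

-- ===== CLAIM (what is proved, stated in full; the proofs are below) =====
def Claim_equal_sort_edges_to_facets : Prop := ∀ (edge_dict : List (Int × Int)) (edges_to_facets_dict : List (Int × Int)), Dom_sort_edges_to_facets edge_dict edges_to_facets_dict → Pre_sort_edges_to_facets edge_dict edges_to_facets_dict → Spec_sort_edges_to_facets edge_dict edges_to_facets_dict (sort_edges_to_facets edge_dict edges_to_facets_dict)

-- ===== LEMMAS AND PROOFS =====

def pvKeysOf (S : List (Int × Int)) (v : Int) : List Int :=
  (S.filter (fun p => p.2 == v)).map Prod.fst

lemma pv_dedup_snoc (xs : List Int) (x : Int) :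
    PySem.List.dedup (xs ++ [x]) =
      if x ∈ xs then PySem.List.dedup xs else PySem.List.dedup xs ++ [x] := by
  have h : PySem.List.dedup (xs ++ [x]) = PySem.Set.add (PySem.List.dedup xs) x := by
    simp [PySem.List.dedup, PySem.Set.ofList, List.foldl_append]
  rw [h, PySem.Set.add, PySem.Set.contains]
  by_cases hx : x ∈ xs <;> simp [hx, List.contains_iff_mem, PySem.List.mem_dedup]

lemma pv_keysOf_snoc (T : List (Int × Int)) (p : Int × Int) (v : Int) :
    pvKeysOf (T ++ [p]) v = pvKeysOf T v ++ (if p.2 = v then [p.1] else []) := by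
  simp [pvKeysOf, List.filter_append]
  split_ifs <;> simp_all

lemma pv_keysOf_not_mem (T : List (Int × Int)) (v : Int) (h : v ∉ T.map Prod.snd) :
    pvKeysOf T v = [] := by
  simp only [pvKeysOf, List.map_eq_nil_iff, List.filter_eq_nil_iff]
  intro p hp hbe
  exact h (List.mem_map.mpr ⟨p, hp, by simpa using hbe⟩)

lemma pv_keysOf_ne_nil (T : List (Int × Int)) (v : Int) (h : v ∈ T.map Prod.snd) :
    pvKeysOf T v ≠ [] := by
  obtain ⟨p, hp, hv⟩ := List.mem_map.mp h
  simp only [pvKeysOf, ne_eq, List.map_eq_nil_iff, List.filter_eq_nil_iff]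
  intro hc
  exact hc p hp (by simp [hv])

lemma pv_mem_keysOf (T : List (Int × Int)) (v k : Int) (h : k ∈ pvKeysOf T v) :
    (k, v) ∈ T := by
  obtain ⟨p, hp, hk⟩ := List.mem_map.mp h
  have := List.mem_filter.mp hp
  have hv : p.2 = v := by simpa using this.2
  have : p = (k, v) := by cases p; simp_all
  exact this ▸ this.symm ▸ (List.mem_filter.mp hp).1

lemma pv_head_mem (T : List (Int × Int)) (v : Int) (h : v ∈ T.map Prod.snd) :
    (pvKeysOf T v).headD 0 ∈ pvKeysOf T v := by
  have := pv_keysOf_ne_nil T v h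
  cases hk : pvKeysOf T v with
  | nil => exact absurd hk this
  | cons a t => simp

lemma pv_head_mem_fst (T : List (Int × Int)) (v : Int) (h : v ∈ T.map Prod.snd) :
    (pvKeysOf T v).headD 0 ∈ T.map Prod.fst := by
  have := pv_mem_keysOf T v _ (pv_head_mem T v h)
  exact List.mem_map.mpr ⟨_, this, rfl⟩

lemma pv_head_inj (T : List (Int × Int)) (hn : (T.map Prod.fst).Nodup)
    {v1 v2 : Int} (h1 : v1 ∈ T.map Prod.snd) (h2 : v2 ∈ T.map Prod.snd)
    (he : (pvKeysOf T v1).headD 0 = (pvKeysOf T v2).headD 0) : v1 = v2 := by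
  have m1 := pv_mem_keysOf T v1 _ (pv_head_mem T v1 h1)
  have m2 := pv_mem_keysOf T v2 _ (pv_head_mem T v2 h2)
  rw [he] at m1
  have := List.inj_on_of_nodup_map hn m1 m2 rfl
  simpa using congrArg Prod.snd this

lemma pv_find_map {β : Type} (l : List Int) (g : Int → Int) (f : Int → β) (v : Int)
    (hv : v ∈ l) (hinj : ∀ x ∈ l, g x = g v → x = v) :
    (l.map (fun x => (g x, f x))).find? (fun q => q.1 == g v) = some (g v, f v) := by
  induction l with
  | nil => simp at hv
  | cons a t ih =>
    by_cases ha : g a = g v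
    · have : a = v := hinj a (by simp) ha
      subst this
      simp
    · have hb : (((g a, f a) : Int × β).1 == g v) = false := by simpa using ha
      rw [List.map_cons, List.find?_cons_of_neg (by simp [ha])]
      rcases List.mem_cons.mp hv with h|h
      · exact absurd (by rw [h]) ha
      · exact ih h (fun x hx hg => hinj x (List.mem_cons_of_mem _ hx) hg)

lemma pv_any_map {β : Type} (l : List Int) (g : Int → Int) (f : Int → β) (w : Int) :
    ((l.map (fun x => (g x, f x))).any (fun q => q.1 == w)) = decide (w ∈ l.map g) := by
  induction l with
  | nil => simp
  | cons a t ih =>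
    by_cases h : g a = w
    · simp [h]
    · have h' : ¬ w = g a := fun hh => h hh.symm
      simp [h, h', ih]

lemma pv_headD_append (l m : List Int) (h : l ≠ []) : (l ++ m).headD 0 = l.headD 0 := by
  cases l with
  | nil => exact absurd rfl h
  | cons a t => simp

lemma pv_inner_fold (E : Int → Int) (g0 : Int) (t : List Int) :
    ∀ (pre : List (Int × List Int)) (u : List Int), (∀ p ∈ pre, p.1 ≠ g0) →
      (t.foldl (fun nd k => nd.modify g0 [] (fun l => l ++ [E k]))
        (⟨pre ++ [(g0, u)]⟩ : PySem.Dict Int (List Int)))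
        = (⟨pre ++ [(g0, u ++ t.map E)]⟩ : PySem.Dict Int (List Int)) := by
  induction t with
  | nil => intro pre u hpre; simp
  | cons k t ih =>
    intro pre u hpre
    have hfind : (pre.find? (fun q => q.1 == g0)) = none :=
      List.find?_eq_none.mpr (fun p hp => by simpa using hpre p hp)
    have hd : (⟨pre ++ [(g0,u)]⟩ : PySem.Dict Int (List Int)).getD g0 [] = u := by
      simp [PySem.Dict.getD, PySem.Dict.get?, PySem.Dict.items, List.find?_append, hfind]
    have hc : (⟨pre ++ [(g0,u)]⟩ : PySem.Dict Int (List Int)).contains g0 = true := by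
      simp [PySem.Dict.contains, PySem.Dict.items]
    have hmap : pre.map (fun q => if q.1 = g0 then (g0, u ++ [E k]) else q) = pre := by
      rw [List.map_congr_left (g := id) (fun q hq => by simp [hpre q hq]), List.map_id]
    have hstep : (⟨pre ++ [(g0,u)]⟩ : PySem.Dict Int (List Int)).modify g0 [] (fun l => l ++ [E k])
        = (⟨pre ++ [(g0, u ++ [E k])]⟩ : PySem.Dict Int (List Int)) := by
      simp [PySem.Dict.modify, hd, PySem.Dict.insert, hc, PySem.Dict.items, hmap]
    simp only [List.foldl_cons, hstep]
    rw [ih pre (u ++ [E k]) hpre]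
    simp

lemma pv_phase2 (E : Int → Int) :
    ∀ (gs : List (List Int)) (d : PySem.Dict Int (List Int)),
      (∀ g ∈ gs, g ≠ []) →
      (gs.map (fun g => g.headD 0)).Nodup →
      (∀ g ∈ gs, d.contains (g.headD 0) = false) →
      (gs.foldl
        (fun nd group =>
          match group with
          | [] => nd
          | g0 :: rest =>
            rest.foldl (fun nd k => nd.modify g0 [] (fun l => l ++ [E k]))
              (nd.insert g0 [E g0])) d).items
        = d.items ++ gs.map (fun g => (g.headD 0, g.map E)) := by
  intro gs
  induction gs with
  | nil => intro d _ _ _; simp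
  | cons g rest ih =>
    intro d hne hnd hct
    cases g with
    | nil => exact absurd rfl (hne [] (by simp))
    | cons g0 t =>
      have hc0 : d.contains g0 = false := by simpa using hct (g0 :: t) (by simp)
      have hpre : ∀ p ∈ d.items, p.1 ≠ g0 := by
        intro p hp he
        have : d.items.any (fun q => q.1 == g0) = true := List.any_eq_true.mpr ⟨p, hp, by simp [he]⟩
        rw [PySem.Dict.contains] at hc0
        simp [this] at hc0
      have hins : d.insert g0 [E g0] = (⟨d.items ++ [(g0, [E g0])]⟩ : PySem.Dict Int (List Int)) := by
        simp [PySem.Dict.insert, hc0]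
      simp only [List.foldl_cons, hins, pv_inner_fold E g0 t d.items [E g0] hpre]
      rw [List.map_cons] at hnd
      obtain ⟨hg0nm, hndr⟩ := List.nodup_cons.mp hnd
      simp only [List.headD_cons] at hg0nm
      rw [ih _ (fun g hg => hne g (by simp [hg])) hndr
            (fun g hg => by
              have h1 : d.contains (g.headD 0) = false := hct g (by simp [hg])
              have h2 : (g0 == g.headD 0) = false := by
                simp only [beq_eq_false_iff_ne]
                exact fun he => hg0nm (he ▸ List.mem_map.mpr ⟨g, hg, rfl⟩)
              simp only [PySem.Dict.contains, PySem.Dict.items] at h1 ⊢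
              rw [List.any_append, h1, List.any_cons, List.any_nil, h2]
              rfl)]
      simp

lemma pv_groups_items (S : List (Int × Int)) :
    (S.foldl (fun d kv => d.modify kv.2 [] (fun g => g ++ [kv.1]))
      (PySem.Dict.empty : PySem.Dict Int (List Int))).items
      = (PySem.List.dedup (S.map Prod.snd)).map (fun v => (v, pvKeysOf S v)) := by
  induction S using List.reverseRecOn with
  | nil => simp [PySem.List.dedup, PySem.Set.ofList, PySem.Set.empty, PySem.Dict.empty]
  | append_singleton T p ih =>
    rw [List.foldl_append, List.foldl_cons, List.foldl_nil]
    rw [PySem.Dict.modify, PySem.Dict.insert, PySem.Dict.contains, PySem.Dict.getD,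
        PySem.Dict.get?, ih, pv_any_map]
    simp only [List.map_append, List.map_cons, List.map_nil]
    rw [pv_dedup_snoc]
    by_cases hv : p.2 ∈ T.map Prod.snd
    · have hmem : p.2 ∈ PySem.List.dedup (T.map Prod.snd) := by
        rw [PySem.List.mem_dedup]; exact hv
      have hfind := pv_find_map (PySem.List.dedup (T.map Prod.snd)) (fun v => v)
        (fun v => pvKeysOf T v) p.2 hmem (fun x _ h => h)
      rw [hfind]
      have hcond : p.2 ∈ List.map (fun v => v) (PySem.List.dedup (T.map Prod.snd)) := by
        rw [List.map_id']; exact hmem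
      rw [if_pos (decide_eq_true hcond), if_pos hv]
      simp only [Option.map_some, Option.getD_some, List.map_map]
      apply List.map_congr_left
      intro v hvD
      by_cases hvv : v = p.2
      · subst hvv; simp [pv_keysOf_snoc]
      · simp only [Function.comp]
        rw [if_neg (by simpa using hvv), pv_keysOf_snoc, if_neg (fun h : p.2 = v => hvv h.symm),
            List.append_nil]
    · have hnm : p.2 ∉ PySem.List.dedup (T.map Prod.snd) := by
        rw [PySem.List.mem_dedup]; exact hv
      have hfind : ((PySem.List.dedup (T.map Prod.snd)).map (fun v => (v, pvKeysOf T v))).find?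
          (fun q => q.1 == p.2) = none := by
        refine List.find?_eq_none.mpr (fun q hq => ?_)
        obtain ⟨v, hvD, rfl⟩ := List.mem_map.mp hq
        simpa using fun h : v = p.2 => hnm (by rw [← h]; exact hvD)
      rw [hfind]
      have hcond : ¬ (p.2 ∈ List.map (fun v => v) (PySem.List.dedup (T.map Prod.snd))) := by
        rw [List.map_id']; exact hnm
      rw [if_neg (by simpa using hcond), if_neg hv]
      simp only [Option.map_none, Option.getD_none, List.map_append]
      congr 1
      · apply List.map_congr_left
        intro v hvD
        rw [pv_keysOf_snoc, if_neg (fun h : p.2 = v => hnm (by rw [h]; exact hvD)), List.append_nil]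
      · rw [List.map_cons, List.map_nil, pv_keysOf_snoc, if_pos rfl,
            pv_keysOf_not_mem T p.2 hv, List.nil_append]

def pvSpec (E : Int → Int) (S : List (Int × Int)) : List (Int × List Int) :=
  (PySem.List.dedup (S.map Prod.snd)).map
    (fun v => ((pvKeysOf S v).headD 0, (pvKeysOf S v).map E))

lemma pv_A_items (E : Int → Int) (S : List (Int × Int)) (hn : (S.map Prod.fst).Nodup) :
    ((S.foldl (fun d kv => d.modify kv.2 [] (fun g => g ++ [kv.1]))
        (PySem.Dict.empty : PySem.Dict Int (List Int))).values.foldl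
      (fun nd group =>
        match group with
        | [] => nd
        | g0 :: rest =>
          rest.foldl (fun nd k => nd.modify g0 [] (fun l => l ++ [E k]))
            (nd.insert g0 [E g0]))
      PySem.Dict.empty).items = pvSpec E S := by
  have hvals : (S.foldl (fun d kv => d.modify kv.2 [] (fun g => g ++ [kv.1]))
      (PySem.Dict.empty : PySem.Dict Int (List Int))).values
      = (PySem.List.dedup (S.map Prod.snd)).map (fun v => pvKeysOf S v) := by
    rw [PySem.Dict.values, pv_groups_items, List.map_map]
    rfl
  rw [hvals, pv_phase2 E _ _
      (fun g hg => by
        obtain ⟨v, hvD, rfl⟩ := List.mem_map.mp hg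
        exact pv_keysOf_ne_nil S v ((PySem.List.mem_dedup _ _).mp hvD))
      (by
        rw [List.map_map]
        refine List.Nodup.map_on ?_ (PySem.List.nodup_dedup _)
        intro v1 h1 v2 h2 he
        exact pv_head_inj S hn ((PySem.List.mem_dedup _ _).mp h1)
          ((PySem.List.mem_dedup _ _).mp h2) he)
      (fun g _ => by simp [PySem.Dict.empty, PySem.Dict.contains])]
  rw [List.map_map]
  simp [PySem.Dict.empty, pvSpec]

lemma pv_B_fold (E : Int → Int) (S : List (Int × Int)) (hn : (S.map Prod.fst).Nodup) :
    (S.foldl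
      (fun (st : PySem.Dict Int (List Int) × PySem.Dict Int Int) kv =>
        let res := if st.2.contains kv.2 then (st.1, st.2)
                   else (st.1.insert kv.1 [], st.2.insert kv.2 kv.1)
        (res.1.modify (res.2.getD kv.2 0) [] (fun l => l ++ [E kv.1]), res.2))
      ((PySem.Dict.empty : PySem.Dict Int (List Int)), (PySem.Dict.empty : PySem.Dict Int Int)))
      = (⟨pvSpec E S⟩,
         ⟨(PySem.List.dedup (S.map Prod.snd)).map (fun v => (v, (pvKeysOf S v).headD 0))⟩) := by
  induction S using List.reverseRecOn with
  | nil =>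
    simp [pvSpec, PySem.List.dedup, PySem.Set.ofList, PySem.Set.empty, PySem.Dict.empty]
  | append_singleton T p ih =>
    have hnT : (T.map Prod.fst).Nodup := by
      rw [List.map_append] at hn
      exact hn.of_append_left
    have hpnot : p.1 ∉ T.map Prod.fst := by
      rw [List.map_append] at hn
      intro hmem
      exact (List.disjoint_of_nodup_append hn) hmem (by simp)
    rw [List.foldl_append, ih hnT, List.foldl_cons, List.foldl_nil]
    simp only [List.map_append, List.map_cons, List.map_nil]
    rw [pv_dedup_snoc]
    set D := PySem.List.dedup (T.map Prod.snd) with hD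
    by_cases hv : p.2 ∈ T.map Prod.snd
    · have hmem : p.2 ∈ D := by rw [hD, PySem.List.mem_dedup]; exact hv
      have hcont : (PySem.Dict.mk (D.map (fun v => (v, (pvKeysOf T v).headD 0)))).contains p.2 = true := by
        rw [PySem.Dict.contains, PySem.Dict.items, pv_any_map]
        simp only [decide_eq_true_eq]
        rw [List.map_id']
        exact hmem
      have hrep : (PySem.Dict.mk (D.map (fun v => (v, (pvKeysOf T v).headD 0)))).getD p.2 0
          = (pvKeysOf T p.2).headD 0 := by
        rw [PySem.Dict.getD, PySem.Dict.get?, PySem.Dict.items,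
            pv_find_map D (fun v => v) (fun v => (pvKeysOf T v).headD 0) p.2 hmem (fun x _ h => h)]
        simp
      have hinj : ∀ x ∈ D, (pvKeysOf T x).headD 0 = (pvKeysOf T p.2).headD 0 → x = p.2 :=
        fun x hx he => pv_head_inj T hnT ((PySem.List.mem_dedup _ _).mp hx) hv he
      have hgetD : (PySem.Dict.mk (pvSpec E T)).getD ((pvKeysOf T p.2).headD 0) [] = (pvKeysOf T p.2).map E := by
        rw [PySem.Dict.getD, PySem.Dict.get?, PySem.Dict.items, pvSpec,
            pv_find_map D (fun v => (pvKeysOf T v).headD 0) (fun v => (pvKeysOf T v).map E) p.2 hmem hinj]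
        simp
      have hcont2 : (PySem.Dict.mk (pvSpec E T)).contains ((pvKeysOf T p.2).headD 0) = true := by
        rw [PySem.Dict.contains, PySem.Dict.items, pvSpec, pv_any_map]
        simp only [decide_eq_true_eq]
        exact List.mem_map.mpr ⟨p.2, hmem, rfl⟩
      simp only [hcont, if_pos, if_true]
      rw [if_pos hv]
      simp only [PySem.Dict.modify, hrep, hgetD, PySem.Dict.insert, hcont2, if_pos, if_true]
      rw [Prod.mk.injEq]
      constructor
      · -- result dict
        apply congrArg PySem.Dict.mk
        conv_rhs => rw [pvSpec]
        simp only [List.map_append, List.map_cons, List.map_nil]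
        rw [pv_dedup_snoc, if_pos hv, ← hD, pvSpec, List.map_map]
        apply List.map_congr_left
        intro v hvD
        simp only [Function.comp_apply]
        by_cases hvv : v = p.2
        · subst hvv
          rw [if_pos (by simp), pv_keysOf_snoc, if_pos rfl,
              pv_headD_append _ _ (pv_keysOf_ne_nil T p.2 hv), List.map_append]
          rfl
        · rw [if_neg (by simpa using fun he => hvv (hinj v hvD he)), pv_keysOf_snoc,
              if_neg (fun h : p.2 = v => hvv h.symm), List.append_nil]
      · -- rep dict unchanged
        apply congrArg PySem.Dict.mk
        apply Eq.symm
        apply List.map_congr_left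
        intro v hvD
        rw [pv_keysOf_snoc]
        by_cases hvv : p.2 = v
        · rw [if_pos hvv, pv_headD_append _ _ (pv_keysOf_ne_nil T v (hvv ▸ hv))]
        · rw [if_neg hvv, List.append_nil]
    · have hnm : p.2 ∉ D := by rw [hD, PySem.List.mem_dedup]; exact hv
      have hcont : (PySem.Dict.mk (D.map (fun v => (v, (pvKeysOf T v).headD 0)))).contains p.2 = false := by
        rw [PySem.Dict.contains, PySem.Dict.items, pv_any_map]
        simp only [decide_eq_false_iff_not]
        rw [List.map_id']
        exact hnm
      have hcontR : (PySem.Dict.mk (pvSpec E T)).contains p.1 = false := by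
        rw [PySem.Dict.contains, PySem.Dict.items, pvSpec, pv_any_map]
        simp only [decide_eq_false_iff_not]
        intro hmem
        obtain ⟨v, hvD, he⟩ := List.mem_map.mp hmem
        exact hpnot (he ▸ pv_head_mem_fst T v ((PySem.List.mem_dedup _ _).mp hvD))
      have hinsR : (PySem.Dict.mk (pvSpec E T)).insert p.1 []
          = PySem.Dict.mk (pvSpec E T ++ [(p.1, [])]) := by
        rw [PySem.Dict.insert, hcontR]
        simp
      have hinsP : (PySem.Dict.mk (D.map (fun v => (v, (pvKeysOf T v).headD 0)))).insert p.2 p.1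
          = PySem.Dict.mk (D.map (fun v => (v, (pvKeysOf T v).headD 0)) ++ [(p.2, p.1)]) := by
        rw [PySem.Dict.insert, hcont]
        simp
      have hfindP : (D.map (fun v => (v, (pvKeysOf T v).headD 0))).find? (fun q => q.1 == p.2) = none := by
        refine List.find?_eq_none.mpr (fun q hq => ?_)
        obtain ⟨v, hvD, rfl⟩ := List.mem_map.mp hq
        simpa using fun h : v = p.2 => hnm (by rw [← h]; exact hvD)
      have hrep : (PySem.Dict.mk (D.map (fun v => (v, (pvKeysOf T v).headD 0)) ++ [(p.2, p.1)])).getD p.2 0 = p.1 := by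
        rw [PySem.Dict.getD, PySem.Dict.get?, PySem.Dict.items, List.find?_append, hfindP]
        simp
      have hfindR : (pvSpec E T).find? (fun q => q.1 == p.1) = none := by
        refine List.find?_eq_none.mpr (fun q hq => ?_)
        rw [pvSpec] at hq
        obtain ⟨v, hvD, rfl⟩ := List.mem_map.mp hq
        simpa using fun h : (pvKeysOf T v).headD 0 = p.1 => hpnot (h ▸ pv_head_mem_fst T v ((PySem.List.mem_dedup _ _).mp hvD))
      have hgetD : (PySem.Dict.mk (pvSpec E T ++ [(p.1, [])])).getD p.1 [] = [] := by
        rw [PySem.Dict.getD, PySem.Dict.get?, PySem.Dict.items, List.find?_append, hfindR]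
        simp
      have hcontR' : (PySem.Dict.mk (pvSpec E T ++ [(p.1, [])])).contains p.1 = true := by
        rw [PySem.Dict.contains, PySem.Dict.items, List.any_append]
        simp
      simp only [hcont, Bool.false_eq_true, if_false]
      rw [if_neg hv]
      simp only [hinsR, hinsP]
      simp only [hrep]
      rw [PySem.Dict.modify, hgetD, PySem.Dict.insert, hcontR', if_pos rfl]
      simp only [List.nil_append]
      rw [Prod.mk.injEq]
      constructor
      · apply congrArg PySem.Dict.mk
        rw [List.map_append]
        conv_rhs => rw [pvSpec]
        conv_rhs => simp only [List.map_append, List.map_cons, List.map_nil]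
        rw [pv_dedup_snoc, if_neg hv, ← hD, List.map_append]
        congr 1
        · rw [pvSpec, List.map_map]
          apply List.map_congr_left
          intro v hvD
          simp only [Function.comp_apply]
          rw [if_neg (by
                simpa using fun h : (pvKeysOf T v).headD 0 = p.1 =>
                  hpnot (h ▸ pv_head_mem_fst T v ((PySem.List.mem_dedup _ _).mp hvD))),
              pv_keysOf_snoc, if_neg (fun h : p.2 = v => hnm (by rw [h]; exact hvD)), List.append_nil]
        · simp [pv_keysOf_snoc, pv_keysOf_not_mem T p.2 hv]
      · apply congrArg PySem.Dict.mk
        rw [List.map_append]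
        apply Eq.symm
        congr 1
        · apply List.map_congr_left
          intro v hvD
          rw [pv_keysOf_snoc, if_neg (fun h : p.2 = v => hnm (by rw [h]; exact hvD)), List.append_nil]
        · rw [List.map_cons, List.map_nil, pv_keysOf_snoc, if_pos rfl, pv_keysOf_not_mem T p.2 hv,
              List.nil_append]
          rfl

-- ===== VERDICT (by name: the statement is the Claim_ definition above) =====
theorem sort_edges_to_facets_spec : Claim_equal_sort_edges_to_facets := by
  intro ed etf _ hpre
  unfold Spec_sort_edges_to_facets
  simp only [sort_edges_to_facets, sort_edges_to_facets_alt]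
  have hperm : ((PySem.List.sorted2 ed (fun kv => kv.1) (fun kv => kv.2)).map Prod.fst).Perm
      (ed.map Prod.fst) := (PySem.List.sorted2_perm ed _ _ false).map _
  have hn : ((PySem.List.sorted2 ed (fun kv => kv.1) (fun kv => kv.2)).map Prod.fst).Nodup :=
    hperm.nodup_iff.mpr hpre.1
  rw [pv_A_items (fun k => (PySem.Dict.ofList etf).getD k 0) _ hn,
      pv_B_fold (fun k => (PySem.Dict.ofList etf).getD k 0) _ hn]
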